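-- pv_equiv track=rewrite | github.com/mrx-n15/quantum-phone-diver | quantum-phone-diver.py | get_carrier_details
-- ===== SOURCE A (Python) =====
-- def get_carrier_details(phone_number):
--     """Dapatkan detail lengkap operator"""
--     # Bersihkan nomor
--     clean_number = phone_number.replace('+', '').replace(' ', '').replace('-', '')
--
--     # Ambil 5 digit pertama untuk identifikasi
--     prefix = clean_number[:5] if len(clean_number) >= 5 else clean_number
--
--     # Database operator Indonesia (publik)
--     carrier_db = {
--         # Telkomsel
--         "62811": {"carrier": "Telkomsel", "type": "GSM", "generation": "4G/5G", "technology": "LTE/5G NR"},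
--         "62812": {"carrier": "Telkomsel", "type": "GSM", "generation": "4G/5G", "technology": "LTE/5G NR"},
--         "62813": {"carrier": "Telkomsel", "type": "GSM", "generation": "4G/5G", "technology": "LTE/5G NR"},
--         "62821": {"carrier": "Telkomsel", "type": "GSM", "generation": "4G/5G", "technology": "LTE/5G NR"},
--         "62822": {"carrier": "Telkomsel", "type": "GSM", "generation": "4G/5G", "technology": "LTE/5G NR"},
--         "62823": {"carrier": "Telkomsel", "type": "GSM", "generation": "4G/5G", "technology": "LTE/5G NR"},
--         "62851": {"carrier": "Telkomsel", "type": "GSM", "generation": "4G/5G", "technology": "LTE/5G NR"},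
--         "62852": {"carrier": "Telkomsel", "type": "GSM", "generation": "4G/5G", "technology": "LTE/5G NR"},
--         "62853": {"carrier": "Telkomsel", "type": "GSM", "generation": "4G/5G", "technology": "LTE/5G NR"},
--
--         # Indosat
--         "62814": {"carrier": "Indosat", "type": "GSM", "generation": "4G", "technology": "LTE"},
--         "62815": {"carrier": "Indosat", "type": "GSM", "generation": "4G", "technology": "LTE"},
--         "62816": {"carrier": "Indosat", "type": "GSM", "generation": "4G", "technology": "LTE"},
--         "62855": {"carrier": "Indosat", "type": "GSM", "generation": "4G", "technology": "LTE"},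
--         "62856": {"carrier": "Indosat", "type": "GSM", "generation": "4G", "technology": "LTE"},
--         "62857": {"carrier": "Indosat", "type": "GSM", "generation": "4G", "technology": "LTE"},
--         "62858": {"carrier": "Indosat", "type": "GSM", "generation": "4G", "technology": "LTE"},
--
--         # XL
--         "62817": {"carrier": "XL", "type": "GSM", "generation": "4G/5G", "technology": "LTE/5G NR"},
--         "62818": {"carrier": "XL", "type": "GSM", "generation": "4G/5G", "technology": "LTE/5G NR"},
--         "62819": {"carrier": "XL", "type": "GSM", "generation": "4G/5G", "technology": "LTE/5G NR"},
--         "62859": {"carrier": "XL", "type": "GSM", "generation": "4G/5G", "technology": "LTE/5G NR"},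
--         "62877": {"carrier": "XL", "type": "GSM", "generation": "4G/5G", "technology": "LTE/5G NR"},
--         "62878": {"carrier": "XL", "type": "GSM", "generation": "4G/5G", "technology": "LTE/5G NR"},
--         "62879": {"carrier": "XL", "type": "GSM", "generation": "4G/5G", "technology": "LTE/5G NR"},
--
--         # Axis
--         "62831": {"carrier": "Axis", "type": "GSM", "generation": "4G", "technology": "LTE"},
--         "62832": {"carrier": "Axis", "type": "GSM", "generation": "4G", "technology": "LTE"},
--         "62833": {"carrier": "Axis", "type": "GSM", "generation": "4G", "technology": "LTE"},
--
--         # Smartfren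
--         "62881": {"carrier": "Smartfren", "type": "CDMA/4G", "generation": "4G", "technology": "LTE"},
--         "62882": {"carrier": "Smartfren", "type": "CDMA/4G", "generation": "4G", "technology": "LTE"},
--         "62883": {"carrier": "Smartfren", "type": "CDMA/4G", "generation": "4G", "technology": "LTE"},
--         "62884": {"carrier": "Smartfren", "type": "CDMA/4G", "generation": "4G", "technology": "LTE"},
--         "62885": {"carrier": "Smartfren", "type": "CDMA/4G", "generation": "4G", "technology": "LTE"},
--         "62886": {"carrier": "Smartfren", "type": "CDMA/4G", "generation": "4G", "technology": "LTE"},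
--         "62887": {"carrier": "Smartfren", "type": "CDMA/4G", "generation": "4G", "technology": "LTE"},
--         "62888": {"carrier": "Smartfren", "type": "CDMA/4G", "generation": "4G", "technology": "LTE"},
--         "62889": {"carrier": "Smartfren", "type": "CDMA/4G", "generation": "4G", "technology": "LTE"},
--
--         # Three
--         "62895": {"carrier": "Three", "type": "GSM", "generation": "4G", "technology": "LTE"},
--         "62896": {"carrier": "Three", "type": "GSM", "generation": "4G", "technology": "LTE"},
--         "62897": {"carrier": "Three", "type": "GSM", "generation": "4G", "technology": "LTE"},
--         "62898": {"carrier": "Three", "type": "GSM", "generation": "4G", "technology": "LTE"},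
--         "62899": {"carrier": "Three", "type": "GSM", "generation": "4G", "technology": "LTE"},
--
--         # By.U
--         "62838": {"carrier": "By.U", "type": "GSM", "generation": "4G/5G", "technology": "LTE/5G NR"},
--     }
--
--     default = {"carrier": "Unknown", "type": "Unknown", "generation": "Unknown", "technology": "Unknown"}
--
--     # Cari berdasarkan prefix
--     for i in range(5, 3, -1):  # Coba dari 5 digit turun ke 4 digit
--         prefix_part = clean_number[:i]
--         if prefix_part in carrier_db:
--             return carrier_db[prefix_part]
--
--     return default
-- ===== SOURCE B (Python) =====
-- # Digit-range classification: instead of a 41-key prefix table, decode the two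
-- # digits after "628" and classify them by numeric ranges, then build the record
-- # from the carrier name.
--
-- def get_carrier_details(phone_number):
--     clean = phone_number.replace('+', '').replace(' ', '').replace('-', '')
--     carrier = "Unknown"
--     if len(clean) >= 5 and clean.startswith("628") and clean[3].isdigit() and clean[4].isdigit():
--         n = (ord(clean[3]) - 48) * 10 + (ord(clean[4]) - 48)
--         if 11 <= n <= 13 or 21 <= n <= 23 or 51 <= n <= 53:
--             carrier = "Telkomsel"
--         elif 14 <= n <= 16 or 55 <= n <= 58:
--             carrier = "Indosat"
--         elif 17 <= n <= 19 or n == 59 or 77 <= n <= 79: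
--             carrier = "XL"
--         elif 31 <= n <= 33:
--             carrier = "Axis"
--         elif 81 <= n <= 89:
--             carrier = "Smartfren"
--         elif 95 <= n <= 99:
--             carrier = "Three"
--         elif n == 38:
--             carrier = "By.U"
--     if carrier == "Unknown":
--         return {"carrier": "Unknown", "type": "Unknown", "generation": "Unknown", "technology": "Unknown"}
--     if carrier == "Smartfren":
--         t, g, te = "CDMA/4G", "4G", "LTE"
--     elif carrier in ("Telkomsel", "XL", "By.U"):
--         t, g, te = "GSM", "4G/5G", "LTE/5G NR"
--     else:
--         t, g, te = "GSM", "4G", "LTE"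
--     return {"carrier": carrier, "type": t, "generation": g, "technology": te}
-- ===== Notes on version B (the rewrite author's own statement) =====
-- stated objective: alternative
-- what changed: Replaces the 41-entry prefix->record dict (rebuilt each call) and the 5-then-4-digit descending search loop with arithmetic classification: after checking the fixed country/network prefix it decodes the fourth and fifth characters of the cleaned number into a two-digit value and maps it to a carrier by numeric range tests, then builds the record from the carrier name.
import Mathlib
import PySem

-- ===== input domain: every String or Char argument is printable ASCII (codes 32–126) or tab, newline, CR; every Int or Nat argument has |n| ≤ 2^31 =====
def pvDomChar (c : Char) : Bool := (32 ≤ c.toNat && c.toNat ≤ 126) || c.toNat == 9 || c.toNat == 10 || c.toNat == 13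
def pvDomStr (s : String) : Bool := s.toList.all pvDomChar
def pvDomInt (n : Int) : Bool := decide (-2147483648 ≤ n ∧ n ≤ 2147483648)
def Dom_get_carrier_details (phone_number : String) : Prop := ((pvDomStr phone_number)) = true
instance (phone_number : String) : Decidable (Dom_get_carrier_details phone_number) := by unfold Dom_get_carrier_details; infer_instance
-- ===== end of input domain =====

-- B replaces A's 41-key prefix table and its 5-then-4-digit search loop by digit-range
-- classification: it decodes the two digits after "628" into a number and classifies it
-- by numeric ranges, then builds the record from the carrier name (objective: alternative).

-- ===== PORT A =====
-- A-side helpers: the repeated detail records of A's dict literal, named once.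
def pvDetTsel : List (String × String) :=
  [("carrier", "Telkomsel"), ("type", "GSM"), ("generation", "4G/5G"), ("technology", "LTE/5G NR")]
def pvDetIsat : List (String × String) :=
  [("carrier", "Indosat"), ("type", "GSM"), ("generation", "4G"), ("technology", "LTE")]
def pvDetXL : List (String × String) :=
  [("carrier", "XL"), ("type", "GSM"), ("generation", "4G/5G"), ("technology", "LTE/5G NR")]
def pvDetAxis : List (String × String) :=
  [("carrier", "Axis"), ("type", "GSM"), ("generation", "4G"), ("technology", "LTE")]
def pvDetSfren : List (String × String) :=
  [("carrier", "Smartfren"), ("type", "CDMA/4G"), ("generation", "4G"), ("technology", "LTE")]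
def pvDetThree : List (String × String) :=
  [("carrier", "Three"), ("type", "GSM"), ("generation", "4G"), ("technology", "LTE")]
def pvDetByU : List (String × String) :=
  [("carrier", "By.U"), ("type", "GSM"), ("generation", "4G/5G"), ("technology", "LTE/5G NR")]

def pvDbPairs : List (String × List (String × String)) :=
  [("62811", pvDetTsel), ("62812", pvDetTsel), ("62813", pvDetTsel), ("62821", pvDetTsel),
   ("62822", pvDetTsel), ("62823", pvDetTsel), ("62851", pvDetTsel), ("62852", pvDetTsel),
   ("62853", pvDetTsel),
   ("62814", pvDetIsat), ("62815", pvDetIsat), ("62816", pvDetIsat), ("62855", pvDetIsat),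
   ("62856", pvDetIsat), ("62857", pvDetIsat), ("62858", pvDetIsat),
   ("62817", pvDetXL), ("62818", pvDetXL), ("62819", pvDetXL), ("62859", pvDetXL),
   ("62877", pvDetXL), ("62878", pvDetXL), ("62879", pvDetXL),
   ("62831", pvDetAxis), ("62832", pvDetAxis), ("62833", pvDetAxis),
   ("62881", pvDetSfren), ("62882", pvDetSfren), ("62883", pvDetSfren), ("62884", pvDetSfren),
   ("62885", pvDetSfren), ("62886", pvDetSfren), ("62887", pvDetSfren), ("62888", pvDetSfren),
   ("62889", pvDetSfren),
   ("62895", pvDetThree), ("62896", pvDetThree), ("62897", pvDetThree), ("62898", pvDetThree),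
   ("62899", pvDetThree),
   ("62838", pvDetByU)]

def pvDefault : List (String × String) :=
  [("carrier", "Unknown"), ("type", "Unknown"), ("generation", "Unknown"), ("technology", "Unknown")]

def get_carrier_details (phone_number : String) : List (String × String) :=
  let clean_number :=
    PySem.Str.replace (PySem.Str.replace (PySem.Str.replace phone_number "+" "") " " "") "-" ""
  let _prefix :=
    if 5 ≤ PySem.Str.len clean_number then PySem.Str.slice clean_number none (some 5)
    else clean_number
  let carrier_db : PySem.Dict String (List (String × String)) := PySem.Dict.ofList pvDbPairs
  -- for i in range(5, 3, -1): early return on the first prefix_part found in carrier_db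
  match (PySem.List.pyRange 5 3 (-1)).findSome?
      (fun i => carrier_db.get? (PySem.Str.slice clean_number none (some i))) with
  | some v => v
  | none => pvDefault

-- ===== PORT B =====
-- B-side helper: the elif-chain classifying the two digits after "628" into a carrier name.
def pvCarrierOf (n : Int) : String :=
  if (11 ≤ n ∧ n ≤ 13) ∨ (21 ≤ n ∧ n ≤ 23) ∨ (51 ≤ n ∧ n ≤ 53) then "Telkomsel"
  else if (14 ≤ n ∧ n ≤ 16) ∨ (55 ≤ n ∧ n ≤ 58) then "Indosat"
  else if (17 ≤ n ∧ n ≤ 19) ∨ n = 59 ∨ (77 ≤ n ∧ n ≤ 79) then "XL"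
  else if 31 ≤ n ∧ n ≤ 33 then "Axis"
  else if 81 ≤ n ∧ n ≤ 89 then "Smartfren"
  else if 95 ≤ n ∧ n ≤ 99 then "Three"
  else if n = 38 then "By.U"
  else "Unknown"

-- B-side helper: the record-building tail of Source B (default on "Unknown", else name + class fields).
def pvRecordOf (carrier : String) : List (String × String) :=
  if carrier == "Unknown" then
    [("carrier", "Unknown"), ("type", "Unknown"), ("generation", "Unknown"), ("technology", "Unknown")]
  else
    let tgt :=
      if carrier == "Smartfren" then ("CDMA/4G", "4G", "LTE")
      else if carrier == "Telkomsel" || carrier == "XL" || carrier == "By.U" then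
        ("GSM", "4G/5G", "LTE/5G NR")
      else ("GSM", "4G", "LTE")
    [("carrier", carrier), ("type", tgt.1), ("generation", tgt.2.1), ("technology", tgt.2.2)]

def get_carrier_details_alt (phone_number : String) : List (String × String) :=
  let clean :=
    PySem.Str.replace (PySem.Str.replace (PySem.Str.replace phone_number "+" "") " " "") "-" ""
  let carrier :=
    if 5 ≤ PySem.Str.len clean ∧ PySem.Str.startswith clean "628" = true ∧
        ((PySem.Str.pyGet? clean 3).map PySem.Chars.isdigit).getD false = true ∧
        ((PySem.Str.pyGet? clean 4).map PySem.Chars.isdigit).getD false = true then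
      pvCarrierOf
        (((((PySem.Str.pyGet? clean 3).getD ' ').toNat : Int) - 48) * 10 +
          ((((PySem.Str.pyGet? clean 4).getD ' ').toNat : Int) - 48))
    else "Unknown"
  pvRecordOf carrier

-- ===== PRECONDITION & SPEC =====
def Spec_get_carrier_details (phone_number : String) (out : List (String × String)) : Prop := out = get_carrier_details_alt phone_number
instance (phone_number : String) (out : List (String × String)) : Decidable (Spec_get_carrier_details phone_number out) := by unfold Spec_get_carrier_details; infer_instance

-- ===== CLAIM (what is proved, stated in full; the proofs are below) =====
def Claim_equal_get_carrier_details : Prop := ∀ (phone_number : String), Dom_get_carrier_details phone_number → Spec_get_carrier_details phone_number (get_carrier_details phone_number)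

-- ===== LEMMAS AND PROOFS =====

-- A dict whose keys all have 5 characters never finds a key of another length.
theorem pvGet?_none_of_len_ne {ν : Type} (l : List (String × ν)) (t : String)
    (hl : ∀ p ∈ l, p.1.toList.length = 5) (ht : t.toList.length ≠ 5) :
    (PySem.Dict.mk l).get? t = none := by
  induction l with
  | nil => rfl
  | cons p rest ih =>
    rw [PySem.Dict.get?_mk_cons]
    have hne : (p.1 == t) = false := by
      by_contra h
      have heq : p.1 = t := by
        have := eq_of_beq (a := p.1) (b := t) (by revert h; cases hpt : (p.1 == t) <;> simp_all)
        exact this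
      exact ht (heq ▸ hl p (List.mem_cons_self))
    simp only [hne, Bool.false_eq_true, if_false]
    exact ih (fun q hq => hl q (List.mem_cons_of_mem _ hq))

set_option maxRecDepth 8192 in
theorem pvDb_mk : PySem.Dict.ofList pvDbPairs = PySem.Dict.mk pvDbPairs := by decide

-- A's descending 5-then-4-digit loop only ever matches at width 5: every key has 5 chars.
set_option maxRecDepth 8192 in
theorem pvFind (c : String) :
    (PySem.List.pyRange 5 3 (-1)).findSome?
        (fun i => (PySem.Dict.ofList pvDbPairs).get? (PySem.Str.slice c none (some i)))
      = (PySem.Dict.ofList pvDbPairs).get? (PySem.Str.slice c none (some 5)) := by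
  have hr : PySem.List.pyRange 5 3 (-1) = [5, 4] := by decide
  have h4 : (PySem.Dict.ofList pvDbPairs).get? (PySem.Str.slice c none (some 4)) = none := by
    rw [pvDb_mk]
    apply pvGet?_none_of_len_ne
    · decide
    · have h : (PySem.Str.slice c none (some 4)).toList = c.toList.take 4 := by
        simp [PySem.Str.toList_slice, PySem.List.slice]
      rw [h]
      have := List.length_take_le 4 c.toList
      omega
  rw [hr]
  simp only [List.findSome?_cons, List.findSome?_nil, h4]
  cases (PySem.Dict.ofList pvDbPairs).get? (PySem.Str.slice c none (some 5)) <;> rfl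

-- An ASCII digit is one of the ten digit characters.
theorem pvDigitMem (c : Char) (h : PySem.Chars.isdigit c = true) :
    c ∈ ['0','1','2','3','4','5','6','7','8','9'] := by
  unfold PySem.Chars.isdigit at h
  simp only [Bool.and_eq_true, decide_eq_true_eq] at h
  obtain ⟨h1, h2⟩ := h
  rw [Char.le_def] at h1 h2
  have h1' : 48 ≤ c.toNat := h1
  have h2' : c.toNat ≤ 57 := h2
  have h3 : c.toNat = 48 ∨ c.toNat = 49 ∨ c.toNat = 50 ∨ c.toNat = 51 ∨ c.toNat = 52 ∨
      c.toNat = 53 ∨ c.toNat = 54 ∨ c.toNat = 55 ∨ c.toNat = 56 ∨ c.toNat = 57 := by omega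
  rcases h3 with h3|h3|h3|h3|h3|h3|h3|h3|h3|h3 <;> (rw [← Char.ofNat_toNat c, h3]; decide)

-- Every key of A's table has 5 chars, starts with '6','2','8' and ends with two digits.
set_option maxRecDepth 8192 in
theorem pvKeyShape : ∀ p ∈ pvDbPairs,
    p.1.toList.length = 5 ∧ p.1.toList[0]? = some '6' ∧ p.1.toList[1]? = some '2' ∧
    p.1.toList[2]? = some '8' ∧ (p.1.toList[3]?.map PySem.Chars.isdigit).getD false = true ∧
    (p.1.toList[4]?.map PySem.Chars.isdigit).getD false = true := by decide

-- Core: A's table lookup at the 5-char prefix equals B's digit-range classification.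
set_option maxRecDepth 16384 in
theorem pvMain (c : String) :
    (((PySem.Dict.ofList pvDbPairs).get? (PySem.Str.slice c none (some 5))).getD pvDefault)
    = pvRecordOf
        (if 5 ≤ PySem.Str.len c ∧ PySem.Str.startswith c "628" = true ∧
            ((PySem.Str.pyGet? c 3).map PySem.Chars.isdigit).getD false = true ∧
            ((PySem.Str.pyGet? c 4).map PySem.Chars.isdigit).getD false = true then
          pvCarrierOf
            (((((PySem.Str.pyGet? c 3).getD ' ').toNat : Int) - 48) * 10 +
              ((((PySem.Str.pyGet? c 4).getD ' ').toNat : Int) - 48))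
        else "Unknown") := by
  by_cases hg : 5 ≤ PySem.Str.len c ∧ PySem.Str.startswith c "628" = true ∧
      ((PySem.Str.pyGet? c 3).map PySem.Chars.isdigit).getD false = true ∧
      ((PySem.Str.pyGet? c 4).map PySem.Chars.isdigit).getD false = true
  · obtain ⟨h1, h2, h3, h4⟩ := hg
    rw [if_pos ⟨h1, h2, h3, h4⟩]
    -- destructure c.toList = '6' :: '2' :: '8' :: d :: e :: rest
    rw [PySem.Str.startswith_eq, PySem.Chars.startswith_iff] at h2
    obtain ⟨tl, htl⟩ := h2
    have h628 : ("628".toList : List Char) = ['6', '2', '8'] := by decide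
    rw [h628] at htl
    have hlen : 5 ≤ c.toList.length := by
      rw [PySem.Str.len_eq] at h1; exact_mod_cast h1
    match htl2 : tl, hlen2 : c.toList, htl with
    | [], _, _ => rw [← htl] at hlen; simp [htl2] at hlen
    | [d], _, _ => rw [← htl] at hlen; simp [htl2] at hlen
    | d :: e :: rest, _, _ =>
      have hl : c.toList = '6' :: '2' :: '8' :: d :: e :: rest := by
        rw [← htl, htl2]; rfl
      have hg3 : PySem.Str.pyGet? c 3 = some d := by
        rw [show (3:Int) = ((3:Nat):Int) by norm_num, PySem.Str.pyGet?_natCast, hl]; rfl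
      have hg4 : PySem.Str.pyGet? c 4 = some e := by
        rw [show (4:Int) = ((4:Nat):Int) by norm_num, PySem.Str.pyGet?_natCast, hl]; rfl
      rw [hg3] at h3
      rw [hg4] at h4
      simp only [Option.map_some, Option.getD_some] at h3 h4
      have hsl : PySem.Str.slice c none (some 5) = String.ofList ['6', '2', '8', d, e] := by
        apply String.toList_inj.mp
        rw [String.toList_ofList]
        rw [PySem.Str.toList_slice]
        simp only [PySem.Chars.slice_eq_listSlice, hl]
        rw [PySem.List.slice_to (b := 5) (xs := _) (by norm_num)]
        rfl
      rw [pvDb_mk, hsl, hg3, hg4]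
      have hd := pvDigitMem d h3
      have he := pvDigitMem e h4
      fin_cases hd <;> fin_cases he <;> decide
  · rw [if_neg hg]
    have hnone : (PySem.Dict.ofList pvDbPairs).get? (PySem.Str.slice c none (some 5)) = none := by
      rw [pvDb_mk]
      cases hget : (PySem.Dict.mk pvDbPairs).get? (PySem.Str.slice c none (some 5)) with
      | none => rfl
      | some v =>
        exfalso
        apply hg
        have hmem := PySem.Dict.mem_items_of_get?_eq_some _ hget
        have hshape := pvKeyShape _ hmem
        obtain ⟨hk1, hk2, hk3, hk4, hk5, hk6⟩ := hshape
        have hts : (PySem.Str.slice c none (some 5)).toList = c.toList.take 5 := by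
          rw [PySem.Str.toList_slice]
          simp only [PySem.Chars.slice_eq_listSlice]
          rw [PySem.List.slice_to (b := 5) (xs := _) (by norm_num)]
          rfl
        rw [hts] at hk1 hk2 hk3 hk4 hk5 hk6
        have hclen : 5 ≤ c.toList.length := by
          rw [List.length_take] at hk1; omega
        have hi0 : c.toList[0]? = some '6' := by
          rw [← List.getElem?_take_of_lt (by omega : (0:Nat) < 5)]; exact hk2
        have hi1 : c.toList[1]? = some '2' := by
          rw [← List.getElem?_take_of_lt (by omega : (1:Nat) < 5)]; exact hk3
        have hi2 : c.toList[2]? = some '8' := by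
          rw [← List.getElem?_take_of_lt (by omega : (2:Nat) < 5)]; exact hk4
        have hi3 : (c.toList[3]?.map PySem.Chars.isdigit).getD false = true := by
          rw [← List.getElem?_take_of_lt (by omega : (3:Nat) < 5)]; exact hk5
        have hi4 : (c.toList[4]?.map PySem.Chars.isdigit).getD false = true := by
          rw [← List.getElem?_take_of_lt (by omega : (4:Nat) < 5)]; exact hk6
        refine ⟨by rw [PySem.Str.len_eq]; exact_mod_cast hclen, ?_, ?_, ?_⟩
        · rw [PySem.Str.startswith_eq, PySem.Chars.startswith_iff]
          have h628 : ("628".toList : List Char) = ['6', '2', '8'] := by decide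
          rw [h628]
          match hlc : c.toList, hclen with
          | a :: b :: g :: ls, _ =>
            rw [hlc] at hi0 hi1 hi2
            simp only [List.getElem?_cons_zero, List.getElem?_cons_succ,
              Option.some.injEq] at hi0 hi1 hi2
            subst hi0; subst hi1; subst hi2
            exact ⟨ls, rfl⟩
        · rw [show (3:Int) = ((3:Nat):Int) by norm_num, PySem.Str.pyGet?_natCast]; exact hi3
        · rw [show (4:Int) = ((4:Nat):Int) by norm_num, PySem.Str.pyGet?_natCast]; exact hi4
    rw [hnone]
    decide

-- ===== VERDICT (by name: the statement is the Claim_ definition above) =====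
set_option maxRecDepth 16384 in
theorem get_carrier_details_spec : Claim_equal_get_carrier_details := by
  intro s _
  show get_carrier_details s = get_carrier_details_alt s
  unfold get_carrier_details get_carrier_details_alt
  simp only [pvFind]
  have hm := pvMain (PySem.Str.replace (PySem.Str.replace (PySem.Str.replace s "+" "") " " "") "-" "")
  cases hget : (PySem.Dict.ofList pvDbPairs).get?
      (PySem.Str.slice (PySem.Str.replace (PySem.Str.replace
        (PySem.Str.replace s "+" "") " " "") "-" "") none (some 5)) with
  | none =>
    rw [hget, Option.getD_none] at hm
    exact hm
  | some v =>
    rw [hget, Option.getD_some] at hm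
    exact hm
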